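-- pv_equiv track=rewrite | github.com/labdao/plex | tools/generator/generators/RME_generator.py | _create_reverse_index_map
-- ===== SOURCE A (Python) =====
-- def _create_reverse_index_map(original, with_dashes):
--     reverse_map_indices = {}
--     j = 0  # Index for the string with dashes
--     for i, char in enumerate(original):
--         # Find the next non-dash character in with_dashes starting from j
--         while with_dashes[j] == '-':
--             j += 1
--         reverse_map_indices[i] = j
--         j += 1  # Move to the next character for the next iteration
--     return reverse_map_indices
-- ===== SOURCE B (Python) =====
-- def _create_reverse_index_map(original, with_dashes):
--     positions = [k for k, c in enumerate(with_dashes) if c != '-']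
--     return {i: positions[i] for i in range(len(original))}
-- ===== Notes on version B (the rewrite author's own statement) =====
-- stated objective: simpler
-- what changed: Replaces A's interleaved pass (advancing a cursor through with_dashes while iterating original) with two separate passes: first collect the non-dash positions into a list, then build the mapping by direct indexing.
import Mathlib
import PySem

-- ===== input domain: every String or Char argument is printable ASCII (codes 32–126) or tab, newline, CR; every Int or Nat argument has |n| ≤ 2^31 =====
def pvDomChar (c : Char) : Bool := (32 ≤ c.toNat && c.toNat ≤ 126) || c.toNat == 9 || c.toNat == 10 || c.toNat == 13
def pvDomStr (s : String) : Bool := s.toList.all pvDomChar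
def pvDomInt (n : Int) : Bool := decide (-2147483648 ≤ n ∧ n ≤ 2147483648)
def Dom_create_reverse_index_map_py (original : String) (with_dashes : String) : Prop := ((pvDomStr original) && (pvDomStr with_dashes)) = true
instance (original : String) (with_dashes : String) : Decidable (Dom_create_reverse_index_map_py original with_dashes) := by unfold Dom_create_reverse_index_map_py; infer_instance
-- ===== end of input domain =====

-- B replaces A's single interleaved cursor pass with two separate passes (collect non-dash
-- positions, then index into that table); objective: simpler. Return-value equivalence only.

-- ===== PORT A =====
-- the 'while with_dashes[j] == '-': j += 1' loop; if j runs past the end Python raises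
-- IndexError (excluded by Pre_), this helper then returns j itself
def pvSkipA (cs : List Char) (j : Nat) : Nat :=
  if h : j < cs.length then
    (if cs[j] = '-' then pvSkipA cs (j + 1) else j)
  else j
termination_by cs.length - j

def create_reverse_index_map_py (original : String) (with_dashes : String) : List (Int × Int) :=
  let cs := with_dashes.toList
  let res := (PySem.List.enumerate original.toList 0).foldl
    (fun st p =>
      let j := pvSkipA cs st.2          -- the while loop advancing j over dashes
      (st.1.insert p.1 ((j : Nat) : Int), j + 1))
    ((PySem.Dict.empty : PySem.Dict Int Int), 0)
  res.1.items

-- ===== PORT B =====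
def create_reverse_index_map_py_alt (original : String) (with_dashes : String) : List (Int × Int) :=
  let positions : List Int :=
    (PySem.List.enumerate with_dashes.toList 0).filterMap
      (fun p => if p.2 ≠ '-' then some p.1 else none)
  (PySem.List.pyRange 0 (PySem.Str.len original) 1).map
    (fun i => (i, (PySem.List.pyGet? positions i).getD 0))
    -- positions[i]: IndexError out of range (excluded by Pre_), then defaults to 0

-- ===== PRECONDITION & SPEC =====
-- Pre_: original needs at most as many characters as with_dashes has non-dash characters;
-- otherwise BOTH A and B raise IndexError (A running j off the end, B indexing positions[i]).
def Pre_create_reverse_index_map_py (original : String) (with_dashes : String) : Prop :=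
  original.toList.length ≤ (with_dashes.toList.filter (fun c => c ≠ '-')).length
instance (original : String) (with_dashes : String) : Decidable (Pre_create_reverse_index_map_py original with_dashes) := by unfold Pre_create_reverse_index_map_py; infer_instance

def pvWitness_create_reverse_index_map_py : String × String := ("ab", "a-b-")

def Spec_create_reverse_index_map_py (original : String) (with_dashes : String) (out : List (Int × Int)) : Prop := out = create_reverse_index_map_py_alt original with_dashes
instance (original : String) (with_dashes : String) (out : List (Int × Int)) : Decidable (Spec_create_reverse_index_map_py original with_dashes out) := by unfold Spec_create_reverse_index_map_py; infer_instance

-- ===== CLAIM (what is proved, stated in full; the proofs are below) =====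
def Claim_equal_create_reverse_index_map_py : Prop := ∀ (original : String) (with_dashes : String), Dom_create_reverse_index_map_py original with_dashes → Pre_create_reverse_index_map_py original with_dashes → Spec_create_reverse_index_map_py original with_dashes (create_reverse_index_map_py original with_dashes)

-- ===== LEMMAS AND PROOFS =====

def pvCastL (l : List Nat) : List Int := List.map (fun n : Nat => (n : Int)) l

theorem pvCastL_cons (a : Nat) (l : List Nat) : pvCastL (a :: l) = (a : Int) :: pvCastL l := rfl

-- positions of the non-dash characters of l, counting from j (structural reference list)
def pvPosS : List Char → Nat → List Nat
  | [], _ => []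
  | c :: t, j => if c = '-' then pvPosS t (j + 1) else j :: pvPosS t (j + 1)

theorem pvPosS_cons_dash (c : Char) (t : List Char) (j : Nat) (h : c = '-') :
    pvPosS (c :: t) j = pvPosS t (j + 1) := by simp [pvPosS, h]

theorem pvPosS_cons_nd (c : Char) (t : List Char) (j : Nat) (h : c ≠ '-') :
    pvPosS (c :: t) j = j :: pvPosS t (j + 1) := by simp [pvPosS, h]

theorem pvPosS_length (l : List Char) : ∀ j : Nat,
    (pvPosS l j).length = (l.filter (fun c => c ≠ '-')).length := by
  induction l with
  | nil => intro j; simp [pvPosS]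
  | cons c t ih =>
    intro j
    by_cases h : c = '-' <;> simp [pvPosS, h, List.filter, ih]

theorem pvPosS_filterMap (l : List Char) : ∀ j : Nat,
    (PySem.List.enumerate l (j : Int)).filterMap
      (fun p => if p.2 ≠ '-' then some p.1 else none)
    = pvCastL (pvPosS l j) := by
  induction l with
  | nil => intro j; simp [pvPosS, pvCastL, PySem.List.enumerate]
  | cons c t ih =>
    intro j
    rw [PySem.List.enumerate_cons, List.filterMap_cons]
    have : (j : Int) + 1 = ((j + 1 : Nat) : Int) := by push_cast; ring
    by_cases h : c = '-'
    · rw [pvPosS_cons_dash _ _ _ h, ← ih (j + 1), ← this]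
      simp [h]
    · rw [pvPosS_cons_nd _ _ _ h, pvCastL_cons, ← ih (j + 1), ← this]
      simp [h]

theorem pvSkipA_pvPosS (cs : List Char) : ∀ (j : Nat) (p : Nat) (rest : List Nat),
    pvPosS (cs.drop j) j = p :: rest →
    pvSkipA cs j = p ∧ pvPosS (cs.drop (p + 1)) (p + 1) = rest := by
  intro j
  induction hn : cs.length - j using Nat.strong_induction_on generalizing j with
  | _ n ih =>
    intro p rest hpos
    by_cases h : j < cs.length
    · have hdrop : cs.drop j = cs[j] :: cs.drop (j + 1) := List.drop_eq_getElem_cons h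
      rw [hdrop] at hpos
      by_cases hc : cs[j] = '-'
      · simp [pvPosS, hc] at hpos
        have := ih (cs.length - (j + 1)) (by omega) (j + 1) rfl p rest hpos
        rw [pvSkipA]
        simp [h, hc, this.1]
        exact this.2
      · simp [pvPosS, hc] at hpos
        obtain ⟨hp, hrest⟩ := hpos
        subst hp
        constructor
        · rw [pvSkipA]; simp [h, hc]
        · exact hrest
    · rw [List.drop_eq_nil_of_le (by omega)] at hpos
      simp [pvPosS] at hpos

theorem pvFoldA (cs : List Char) (l : List Char) : ∀ (s j : Nat) (d : PySem.Dict Int Int),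
    (∀ q ∈ d.items, q.1 < (s : Int)) → d.keys.Nodup →
    l.length ≤ (pvPosS (cs.drop j) j).length →
    ((PySem.List.enumerate l (s : Int)).foldl
      (fun st (p : Int × Char) =>
        let j := pvSkipA cs st.2
        (st.1.insert p.1 ((j : Nat) : Int), j + 1))
      (d, j)).1.items
    = d.items ++ PySem.List.enumerate
        (pvCastL ((pvPosS (cs.drop j) j).take l.length)) (s : Int) := by
  induction l with
  | nil => intro s j d _ _ _; simp [pvCastL, PySem.List.enumerate]
  | cons c t ih =>
    intro s j d hlt hnd hlen
    obtain ⟨p, rest, hpos⟩ : ∃ p rest, pvPosS (cs.drop j) j = p :: rest := by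
      cases hp : pvPosS (cs.drop j) j with
      | nil => rw [hp] at hlen; simp at hlen
      | cons a b => exact ⟨a, b, rfl⟩
    obtain ⟨hskip, hrest⟩ := pvSkipA_pvPosS cs j p rest hpos
    rw [PySem.List.enumerate_cons]
    simp only [List.foldl_cons, hskip]
    have hnc : d.contains (s : Int) = false := by
      by_contra hcon
      have : d.contains (s : Int) = true := by
        cases hx : d.contains (s : Int) <;> simp_all
      rw [PySem.Dict.contains_iff_mem_keys] at this
      simp only [PySem.Dict.keys] at this
      obtain ⟨q, hq, hq1⟩ := List.mem_map.mp this
      have := hlt q hq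
      omega
    have hitems := PySem.Dict.items_insert_of_not_contains d ((p : Nat) : Int) hnc
    have hcast : (s : Int) + 1 = ((s + 1 : Nat) : Int) := by push_cast; ring
    rw [hcast]
    rw [ih (s + 1) (p + 1) _ (by
        intro q hq
        rw [hitems] at hq
        rcases List.mem_append.mp hq with h1 | h1
        · have := hlt q h1; push_cast; omega
        · simp only [List.mem_singleton] at h1; rw [h1]; push_cast; omega)
      (PySem.Dict.nodup_keys_insert d _ _ hnd)
      (by rw [hrest]; rw [hpos] at hlen; simp at hlen ⊢; omega)]
    rw [hitems, hrest, hpos, List.length_cons, List.take_succ_cons, pvCastL_cons,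
      PySem.List.enumerate_cons, hcast, List.append_assoc, List.cons_append, List.nil_append]

theorem create_reverse_index_map_py_spec : Claim_equal_create_reverse_index_map_py := by
  intro original with_dashes _ hpre
  unfold Spec_create_reverse_index_map_py
  unfold create_reverse_index_map_py create_reverse_index_map_py_alt
  set cs := with_dashes.toList with hcs
  set n := original.toList.length with hn
  have hlen : n ≤ (pvPosS cs 0).length := by
    rw [pvPosS_length]
    exact hpre
  have hA := pvFoldA cs original.toList 0 0 PySem.Dict.empty
      (by intro q hq; simp [PySem.Dict.empty] at hq)
      (by simp [PySem.Dict.keys, PySem.Dict.empty])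
      (by simpa using hlen)
  simp only [Nat.cast_zero, List.drop_zero] at hA
  rw [hA]
  simp only [PySem.Dict.empty, List.nil_append]
  -- both sides are the enumerate / map-over-range of the same positions table
  have hposB := pvPosS_filterMap cs 0
  simp only [Nat.cast_zero] at hposB
  rw [hposB]
  set ys := pvCastL ((pvPosS cs 0).take n) with hys
  have hyslen : ys.length = n := by simp [hys, pvCastL]; omega
  rw [PySem.List.enumerate_eq_map_pyRange ys 0]
  have hlst : PySem.List.len ys = PySem.Str.len original := by
    simp [PySem.List.len, PySem.Str.len, hyslen, hn]
  rw [hlst]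
  apply List.map_congr_left
  intro i hi
  rw [PySem.List.mem_pyRange_one] at hi
  have hin : i < (n : Int) := by
    have : PySem.Str.len original = (n : Int) := by simp [PySem.Str.len, hn]
    omega
  obtain ⟨k, hk⟩ : ∃ k : Nat, i = (k : Int) := ⟨i.toNat, by omega⟩
  subst hk
  have hkn : k < n := by exact_mod_cast hin
  congr 1
  rw [PySem.List.pyGetD_natCast, PySem.List.pyGet?_natCast]
  have hk1 : k < ys.length := by omega
  have hk2 : k < (pvCastL (pvPosS cs 0)).length := by
    simp only [pvCastL, List.length_map]; omega
  rw [List.getD_eq_getElem ys 0 hk1, List.getElem?_eq_getElem hk2, Option.getD_some]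
  simp [hys, pvCastL]
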